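-- pv_equiv track=rewrite | github.com/Zedmor/hackerrank-puzzles | leetcode/48Rotate.py | make_lookup
-- ===== SOURCE A (Python) =====
-- from collections import OrderedDict
--
-- def make_lookup(n):
--     lookup = OrderedDict()
--     ind = 0
--     for m in range(4):
--         for i2 in range(0, n - 1):
--             if m == 0:
--                lookup[(0, i2)] = ind
--             elif m == 1:
--                 lookup[(i2, n - 1)] = ind
--             elif m == 2:
--                 lookup[(n - 1, n - i2 - 1)] = ind
--             else:
--                 lookup[(n - i2 - 1, 0)] = ind
--             ind += 1
--     return lookup
-- ===== SOURCE B (Python) =====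
-- from collections import OrderedDict
--
-- def make_lookup(n):
--     lookup = OrderedDict()
--     ind = 0
--     r, c = 0, 0
--     for dr, dc in ((0, 1), (1, 0), (0, -1), (-1, 0)):
--         for _ in range(n - 1):
--             lookup[(r, c)] = ind
--             ind += 1
--             r += dr
--             c += dc
--     return lookup
-- ===== Notes on version B (the rewrite author's own statement) =====
-- stated objective: idiomatic
-- what changed: A selects a per-cell coordinate formula by branching on the edge number m; B walks the perimeter with a single moving pointer (r,c) advanced by four direction vectors, with no per-edge branch or closed formula.
import Mathlib
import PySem

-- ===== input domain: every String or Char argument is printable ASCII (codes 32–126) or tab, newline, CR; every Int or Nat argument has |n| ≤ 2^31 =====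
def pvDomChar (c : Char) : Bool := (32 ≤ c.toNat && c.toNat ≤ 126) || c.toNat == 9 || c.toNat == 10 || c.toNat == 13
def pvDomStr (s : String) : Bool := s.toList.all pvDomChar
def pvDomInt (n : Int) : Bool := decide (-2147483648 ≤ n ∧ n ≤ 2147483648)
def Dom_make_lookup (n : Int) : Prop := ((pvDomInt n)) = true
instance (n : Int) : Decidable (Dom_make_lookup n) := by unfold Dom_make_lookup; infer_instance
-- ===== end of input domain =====

-- B replaces A's per-edge branch on m (choosing a closed coordinate formula per cell) by a single
-- moving pointer (r,c) advanced by four direction vectors — more idiomatic, same O(n) cost.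
-- Return type: the OrderedDict {(r,c): ind} is rendered as its items list, flattened to (r, c, ind).

-- ===== PORT A =====
def make_lookup (n : Int) : List (Int × Int × Int) :=
  let st :=
    (PySem.List.pyRange 0 4 1).foldl
      (fun (st : PySem.Dict (Int × Int) Int × Int) m =>
        (PySem.List.pyRange 0 (n - 1) 1).foldl
          (fun (st2 : PySem.Dict (Int × Int) Int × Int) i2 =>
            let d :=
              if m = 0 then st2.1.insert (0, i2) st2.2
              else if m = 1 then st2.1.insert (i2, n - 1) st2.2
              else if m = 2 then st2.1.insert (n - 1, n - i2 - 1) st2.2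
              else st2.1.insert (n - i2 - 1, 0) st2.2
            (d, st2.2 + 1))
          st)
      (PySem.Dict.empty, 0)
  st.1.items.map (fun p => (p.1.1, p.1.2, p.2))

-- ===== PORT B =====
def make_lookup_alt (n : Int) : List (Int × Int × Int) :=
  let st :=
    [((0 : Int), (1 : Int)), (1, 0), (0, -1), (-1, 0)].foldl
      (fun (st : PySem.Dict (Int × Int) Int × Int × Int × Int) dir =>
        (PySem.List.pyRange 0 (n - 1) 1).foldl
          (fun (st2 : PySem.Dict (Int × Int) Int × Int × Int × Int) _ =>
            (st2.1.insert st2.2.2 st2.2.1,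
             st2.2.1 + 1, st2.2.2.1 + dir.1, st2.2.2.2 + dir.2))
          st)
      (PySem.Dict.empty, 0, 0, 0)
  st.1.items.map (fun p => (p.1.1, p.1.2, p.2))

-- ===== PRECONDITION & SPEC =====
def Spec_make_lookup (n : Int) (out : List (Int × Int × Int)) : Prop := out = make_lookup_alt n
instance (n : Int) (out : List (Int × Int × Int)) : Decidable (Spec_make_lookup n out) := by unfold Spec_make_lookup; infer_instance

-- ===== CLAIM (what is proved, stated in full; the proofs are below) =====
def Claim_equal_make_lookup : Prop := ∀ (n : Int), Dom_make_lookup n → Spec_make_lookup n (make_lookup n)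

-- ===== LEMMAS AND PROOFS =====

-- one B phase in direction (dr,dc): the dict picks up the pointer-formula keys, and the
-- scalar state (index, pointer) ends in closed form
lemma phase_state (dr dc : Int) (k : Nat) (d : PySem.Dict (Int × Int) Int) (ind r c : Int) :
    ((List.range k).map (fun (j : Nat) => (j : Int))).foldl
        (fun (st : PySem.Dict (Int × Int) Int × Int × Int × Int) _ =>
          (st.1.insert st.2.2 st.2.1,
           st.2.1 + 1, st.2.2.1 + dr, st.2.2.2 + dc))
        (d, ind, r, c)
      =
    ((((List.range k).map (fun (j : Nat) => (j : Int))).foldl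
        (fun (st : PySem.Dict (Int × Int) Int × Int) j =>
          (st.1.insert (r + j * dr, c + j * dc) st.2, st.2 + 1)) (d, ind)).1,
     (((List.range k).map (fun (j : Nat) => (j : Int))).foldl
        (fun (st : PySem.Dict (Int × Int) Int × Int) j =>
          (st.1.insert (r + j * dr, c + j * dc) st.2, st.2 + 1)) (d, ind)).2,
     r + k * dr, c + k * dc) := by
  induction k with
  | zero => simp
  | succ k ih =>
      rw [List.range_succ, List.map_append, List.foldl_append, ih]
      simp only [List.map_cons, List.map_nil, List.foldl_append, List.foldl_cons, List.foldl_nil]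
      push_cast
      ring_nf

set_option maxHeartbeats 1000000 in
theorem make_lookup_spec : Claim_equal_make_lookup := by
  intro n _
  unfold Spec_make_lookup make_lookup make_lookup_alt
  have h4 : PySem.List.pyRange 0 4 1 = [0, 1, 2, 3] := by decide
  by_cases hn : n ≤ 1
  · rw [PySem.List.pyRange_one_eq_nil (by omega : n - 1 ≤ 0), h4]
    simp
  · have hn : 1 < n := by omega
    have hk : ((n - 1).toNat : Int) = n - 1 := Int.toNat_of_nonneg (by omega)
    set k := (n - 1).toNat with hkdef
    have hrange : PySem.List.pyRange 0 (n - 1) 1 = (List.range k).map (fun (j : Nat) => (j : Int)) := by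
      rw [PySem.List.pyRange_one]
      simp
      rw [show n.toNat - 1 = k by omega]
    rw [h4, hrange]
    simp only [List.foldl_cons, List.foldl_nil]
    rw [phase_state, phase_state, phase_state, phase_state, hk]
    norm_num
    ring_nf
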